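-- pv_equiv track=rewrite | github.com/Arsen1302/Code-copy-detector | TestData/solutions/problem_682_3.py | solution_682_3
-- ===== SOURCE A (Python) =====
-- from typing import List
--
-- def solution_682_3(A: List[str]) -> List[str]:
--     arr = []
--     for i in set(A[0]):
--         ans = [A[0].count(i)]
--         for j in A[1:]:
--             if(i in j):
--                 ans.append(j.count(i))
--         if(len(ans) == len(A)):
--             arr += ([i] * min(ans))
--     return arr
-- ===== SOURCE B (Python) =====
-- from typing import List
--
-- def solution_682_3(A: List[str]) -> List[str]:
--     # one accumulating multiset-intersection pass over the strings, then one emit pass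
--     common = {}
--     for c in A[0]:
--         common[c] = common.get(c, 0) + 1
--     for j in A[1:]:
--         cnt = {}
--         for c in j:
--             cnt[c] = cnt.get(c, 0) + 1
--         common = {c: min(n, cnt[c]) for c, n in common.items() if c in cnt}
--     arr = []
--     for i in set(A[0]):
--         arr += [i] * common.get(i, 0)
--     return arr
-- ===== Notes on version B (the rewrite author's own statement) =====
-- stated objective: alternative
-- what changed: Replaces A's per-character rescanning (count each char in every string, append conditionally, test len(ans)==len(A)) by one accumulating multiset-intersection fold over the strings using plain dict counters, followed by a separate emit pass over set(A[0]).
import Mathlib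
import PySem

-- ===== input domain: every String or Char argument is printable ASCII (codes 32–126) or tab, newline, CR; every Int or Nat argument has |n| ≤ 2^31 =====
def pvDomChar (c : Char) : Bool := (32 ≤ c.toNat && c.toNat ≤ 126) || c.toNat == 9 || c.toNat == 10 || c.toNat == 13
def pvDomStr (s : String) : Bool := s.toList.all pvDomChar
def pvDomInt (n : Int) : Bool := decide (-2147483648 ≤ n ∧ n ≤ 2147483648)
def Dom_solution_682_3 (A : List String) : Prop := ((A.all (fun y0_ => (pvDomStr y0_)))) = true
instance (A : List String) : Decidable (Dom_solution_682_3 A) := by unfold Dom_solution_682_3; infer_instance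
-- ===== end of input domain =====

-- B replaces A's per-character rescans and length test by one accumulating multiset-intersection
-- pass over the strings plus a separate emit pass (objective: alternative algorithm).
-- (Output order of the Python originals follows CPython's set-iteration order; the ports use the
-- PySem.Set first-occurrence order on both sides, so the Lean equivalence is exact.)

-- ===== PORT A =====
def solution_682_3 (A : List String) : List String :=
  -- arr = []; for i in set(A[0]): ans = [A[0].count(i)]; for j in A[1:]: if i in j: ans.append(j.count(i));
  --           if len(ans) == len(A): arr += [i]*min(ans); return arr
  let a0 := PySem.List.pyGetD A 0 ""   -- A[0]; total form, Pre_ requires A ≠ []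
  (PySem.Set.ofList a0.toList).foldl
    (fun arr i =>
      let ans : List Int :=
        (PySem.List.slice A (some 1) none).foldl
          (fun ans j =>
            if PySem.Chars.isIn [i] j.toList then ans ++ [(PySem.Chars.count j.toList [i] : Int)]
            else ans)
          [(PySem.Chars.count a0.toList [i] : Int)]
      if ans.length = A.length then
        -- min(ans): ans is never empty, so the getD 0 default is never used
        arr ++ PySem.List.pyRepeat [String.mk [i]] ((PySem.List.min? ans (fun x => x)).getD 0)
      else arr)
    []

-- ===== PORT B =====
-- cnt = {}; for c in s: cnt[c] = cnt.get(c, 0) + 1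
def pvCharCounter (s : List Char) : PySem.Dict Char Int :=
  s.foldl (fun d c => d.insert c (d.getD c 0 + 1)) PySem.Dict.empty

def solution_682_3_alt (A : List String) : List String :=
  let common0 := pvCharCounter (PySem.List.pyGetD A 0 "").toList   -- A[0]; Pre_ requires A ≠ []
  -- for j in A[1:]: cnt = Counter(j); common = {c: min(n, cnt[c]) for c, n in common.items() if c in cnt}
  let common :=
    (PySem.List.slice A (some 1) none).foldl
      (fun common j =>
        let cnt := pvCharCounter j.toList
        PySem.Dict.mk ((common.items.filter (fun p => cnt.contains p.1)).map
          (fun p => (p.1, min p.2 (cnt.getD p.1 0)))))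
      common0
  -- arr = []; for i in set(A[0]): arr += [i] * common.get(i, 0)
  (PySem.Set.ofList (PySem.List.pyGetD A 0 "").toList).foldl
    (fun arr i => arr ++ PySem.List.pyRepeat [String.mk [i]] (common.getD i 0)) []

-- ===== PRECONDITION & SPEC =====
-- A[0] raises IndexError on the empty list (B raises there too): Pre_ excludes only A = [].
def Pre_solution_682_3 (A : List String) : Prop := A ≠ []
instance (A : List String) : Decidable (Pre_solution_682_3 A) := by unfold Pre_solution_682_3; infer_instance
def pvWitness_solution_682_3 : List String := ["aab", "ba"]
def Spec_solution_682_3 (A : List String) (out : List String) : Prop := out = solution_682_3_alt A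
instance (A : List String) (out : List String) : Decidable (Spec_solution_682_3 A out) := by unfold Spec_solution_682_3; infer_instance

-- ===== CLAIM (what is proved, stated in full; the proofs are below) =====
def Claim_equal_solution_682_3 : Prop := ∀ (A : List String), Dom_solution_682_3 A → Pre_solution_682_3 A → Spec_solution_682_3 A (solution_682_3 A)

-- ===== LEMMAS AND PROOFS =====

-- str.count with a single-character needle is List.count
theorem pv_go_single (c : Char) : ∀ (fuel : Nat) (l : List Char) (acc : Nat), l.length ≤ fuel →
    PySem.Chars.count.go [c] fuel l acc = acc + l.count c := by
  intro fuel
  induction fuel with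
  | zero => intro l acc h; cases l with
    | nil => simp [PySem.Chars.count.go]
    | cons x t => simp at h
  | succ n ih =>
    intro l acc h
    cases l with
    | nil => simp [PySem.Chars.count.go]
    | cons x t =>
      simp only [PySem.Chars.count.go]
      simp only [List.length_cons, Nat.succ_le_succ_iff] at h
      by_cases hx : x = c
      · subst hx
        have hp : [x].isPrefixOf (x :: t) = true := by simp [List.isPrefixOf]
        simp only [hp, if_pos]
        rw [show ([x].length) = 1 from rfl]
        simp only [List.drop_one, List.tail_cons]
        rw [ih t (acc + 1) h]
        simp
        omega
      · have hp : [c].isPrefixOf (x :: t) = false := by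
          simp [List.isPrefixOf]; exact fun hh => absurd hh.symm hx
        simp only [hp, Bool.false_eq_true, if_false]
        rw [ih t acc h]
        simp [hx]

theorem pv_count_single (s : List Char) (c : Char) : PySem.Chars.count s [c] = s.count c := by
  simp only [PySem.Chars.count, List.isEmpty_cons, Bool.false_eq_true, if_false]
  rw [pv_go_single c s.length s 0 (le_refl _)]
  omega

-- 'i in j' with a single character is membership
theorem pv_isIn_single (c : Char) (s : List Char) : PySem.Chars.isIn [c] s = s.contains c := by
  by_cases h : c ∈ s <;>
    simp [h, PySem.Chars.isIn_iff_infix, PySem.Chars.isIn_eq_false_iff, List.singleton_infix_iff]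

-- the common value both programs compute: the running minimum of i's counts over all of A
def pvMin (a0 : List Char) (js : List String) (i : Char) : Int :=
  js.foldl (fun acc j => min acc (List.count i j.toList : Int)) (List.count i a0 : Int)

theorem pv_foldl_min_nonneg (i : Char) (js : List String) :
    ∀ init : Int, 0 ≤ init → 0 ≤ js.foldl (fun acc j => min acc (List.count i j.toList : Int)) init := by
  induction js with
  | nil => intro init h; simpa using h
  | cons j t ih =>
    intro init h
    exact ih _ (le_min h (by positivity))

theorem pvMin_nonneg (a0 : List Char) (js : List String) (i : Char) : 0 ≤ pvMin a0 js i :=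
  pv_foldl_min_nonneg i js _ (by positivity)

theorem pvCharCounter_eq_counter (s : List Char) : pvCharCounter s = PySem.Dict.counter s :=
  PySem.Dict.foldl_insert_getD_add_one_eq_counter s

theorem pv_counter_get? (xs : List Char) (i : Char) :
    (PySem.Dict.counter xs).get? i =
      if 0 < (List.count i xs : Int) then some (List.count i xs : Int) else none := by
  by_cases hmem : i ∈ xs
  · have hpos : 0 < (List.count i xs : Int) := by
      have := List.count_pos_iff.mpr hmem
      omega
    rw [if_pos hpos]
    have hc : ((PySem.Dict.counter xs).get? i).isSome = true := by
      rw [← PySem.Dict.contains_eq_isSome_get?, PySem.Dict.contains_counter]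
      simpa [List.contains_iff_mem]
    obtain ⟨v, hv⟩ := Option.isSome_iff_exists.mp hc
    have hd := PySem.Dict.getD_counter xs i
    rw [PySem.Dict.getD_eq_get?_getD, hv] at hd
    simp at hd
    rw [hv, hd]
  · have h0 : List.count i xs = 0 := List.count_eq_zero.mpr hmem
    rw [if_neg (by simp [h0])]
    have hc : ((PySem.Dict.counter xs).get? i).isSome = false := by
      rw [← PySem.Dict.contains_eq_isSome_get?, PySem.Dict.contains_counter]
      simpa [List.contains_iff_mem]
    cases hg : (PySem.Dict.counter xs).get? i with
    | none => rfl
    | some v => rw [hg] at hc; simp at hc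

-- lookup in a dict comprehension {k: f(k, v) for k, v in d.items() if q(k)}
theorem pv_get?_mk_filter_map {κ ν : Type} [BEq κ] [LawfulBEq κ]
    (l : List (κ × ν)) (q : κ → Bool) (f : κ → ν → ν) (i : κ) :
    (PySem.Dict.mk ((l.filter (fun p => q p.1)).map (fun p => (p.1, f p.1 p.2)))).get? i
      = if q i then ((PySem.Dict.mk l).get? i).map (f i) else none := by
  induction l with
  | nil =>
    simp [PySem.Dict.get?]
  | cons p t ih =>
    obtain ⟨k, v⟩ := p
    by_cases hq : q k
    · simp only [List.filter_cons, hq, if_pos, List.map_cons, PySem.Dict.get?_mk_cons]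
      by_cases hk : k = i
      · subst hk
        simp [hq]
      · simp only [beq_iff_eq, hk, if_neg, Bool.false_eq_true]
        simpa using ih
    · simp only [List.filter_cons, hq, Bool.false_eq_true, if_false, PySem.Dict.get?_mk_cons]
      by_cases hk : k = i
      · subst hk
        simp [hq, ih]
      · simp only [beq_iff_eq, hk, if_neg, Bool.false_eq_true]
        simpa using ih

-- invariant of B's intersection loop: the dict stores exactly the positive running minima
theorem pv_B_inv : ∀ (js : List String) (d : PySem.Dict Char Int) (g : Char → Int),
    (∀ i, 0 ≤ g i) →
    (∀ i, d.get? i = if 0 < g i then some (g i) else none) →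
    ∀ i, (js.foldl
        (fun common j =>
          let cnt := pvCharCounter j.toList
          PySem.Dict.mk ((common.items.filter (fun p => cnt.contains p.1)).map
            (fun p => (p.1, min p.2 (cnt.getD p.1 0))))) d).get? i
      = if 0 < js.foldl (fun acc j => min acc (List.count i j.toList : Int)) (g i) then
          some (js.foldl (fun acc j => min acc (List.count i j.toList : Int)) (g i)) else none := by
  intro js
  induction js with
  | nil => intro d g _ h i; simpa using h i
  | cons j t ih =>
    intro d g hg h i
    simp only [List.foldl_cons]
    refine ih _ (fun i => min (g i) (List.count i j.toList : Int)) ?_ ?_ i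
    · intro i
      dsimp only
      exact le_min (hg i) (by positivity)
    · intro i
      dsimp only
      have hstep :
          (PySem.Dict.mk ((d.items.filter (fun p => (pvCharCounter j.toList).contains p.1)).map
            (fun p => (p.1, min p.2 ((pvCharCounter j.toList).getD p.1 0))))).get? i
          = if (pvCharCounter j.toList).contains i then
              ((PySem.Dict.mk d.items).get? i).map (fun v => min v ((pvCharCounter j.toList).getD i 0))
            else none :=
        pv_get?_mk_filter_map d.items (fun k => (pvCharCounter j.toList).contains k)
          (fun k v => min v ((pvCharCounter j.toList).getD k 0)) i
      have hdm : PySem.Dict.mk d.items = d := rfl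
      rw [hdm] at hstep
      rw [hstep, pvCharCounter_eq_counter, PySem.Dict.contains_counter,
        PySem.Dict.getD_counter, h i]
      by_cases hmem : i ∈ j.toList
      · have h1 : (1 : Int) ≤ (List.count i j.toList : Int) := by
          have := List.count_pos_iff.mpr hmem
          omega
        rw [if_pos (List.contains_iff_mem.mpr hmem)]
        by_cases hpos : 0 < g i
        · rw [if_pos hpos, Option.map_some]
          rw [if_pos (by omega : (0:Int) < min (g i) (List.count i j.toList : Int))]
        · rw [if_neg hpos, Option.map_none]
          have hg0 : g i = 0 := le_antisymm (by omega) (hg i)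
          rw [if_neg (by rw [hg0]; omega)]
      · have h0 : (List.count i j.toList : Int) = 0 := by
          simp [List.count_eq_zero.mpr hmem]
        rw [if_neg (by simpa [List.contains_iff_mem] using hmem)]
        rw [if_neg (by have := hg i; omega)]

theorem pv_getD_common (a0 : List Char) (js : List String) (i : Char) :
    ((js.foldl
        (fun common j =>
          let cnt := pvCharCounter j.toList
          PySem.Dict.mk ((common.items.filter (fun p => cnt.contains p.1)).map
            (fun p => (p.1, min p.2 (cnt.getD p.1 0))))) (pvCharCounter a0)).getD i 0)
      = pvMin a0 js i := by
  have h := pv_B_inv js (pvCharCounter a0) (fun i => (List.count i a0 : Int))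
    (fun i => by positivity)
    (fun i => by rw [pvCharCounter_eq_counter]; exact pv_counter_get? a0 i)
    i
  rw [PySem.Dict.getD_eq_get?_getD, h]
  unfold pvMin
  split_ifs with hpos
  · rfl
  · have := pv_foldl_min_nonneg i js (List.count i a0 : Int) (by positivity)
    simp only [Option.getD_none]
    omega

-- ===== VERDICT (by name: the statement is the Claim_ definition above) =====
theorem solution_682_3_spec : Claim_equal_solution_682_3 := by
  intro A _ hpre
  unfold Spec_solution_682_3
  obtain ⟨a0, rest, rfl⟩ : ∃ h t, A = h :: t := by
    cases A with
    | nil => exact absurd rfl hpre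
    | cons h t => exact ⟨h, t, rfl⟩
  simp only [solution_682_3, solution_682_3_alt, PySem.List.pyGetD_zero_cons,
    PySem.List.slice_from (a0 :: rest) (by omega : (0:Int) ≤ 1), Int.toNat_one,
    List.drop_succ_cons, List.drop_zero]
  apply PySem.List.foldl_congr_mem
  intro acc i _
  rw [pv_getD_common a0.toList rest i]
  have hans : rest.foldl
      (fun ans j => if PySem.Chars.isIn [i] j.toList then ans ++ [(PySem.Chars.count j.toList [i] : Int)] else ans)
      [(PySem.Chars.count a0.toList [i] : Int)]
      = (List.count i a0.toList : Int) ::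
        (rest.filter (fun j => j.toList.contains i)).map (fun j => (List.count i j.toList : Int)) := by
    simp only [pv_isIn_single, pv_count_single]
    exact PySem.List.foldl_append_if (fun j => j.toList.contains i)
      (fun j => (List.count i j.toList : Int)) rest [(List.count i a0.toList : Int)]
  rw [hans]
  by_cases hall : ∀ j ∈ rest, j.toList.contains i = true
  · have hfil : rest.filter (fun j => j.toList.contains i) = rest := List.filter_eq_self.mpr hall
    rw [hfil, if_pos (by simp)]
    rw [PySem.List.min?_id_cons, Option.getD_some, List.foldl_map]
    rfl
  · have hlt : (rest.filter (fun j => j.toList.contains i)).length < rest.length := by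
      apply List.length_filter_lt_length_iff_exists.mpr
      push_neg at hall
      obtain ⟨j, hj, hcj⟩ := hall
      exact ⟨j, hj, hcj⟩
    rw [if_neg (by simp only [List.length_cons, List.length_map]; omega)]
    have hzero : pvMin a0.toList rest i = 0 := by
      push_neg at hall
      obtain ⟨j, hj, hcj⟩ := hall
      have hnm : i ∉ j.toList := by
        intro hm; exact hcj (List.contains_iff_mem.mpr hm)
      have hle : pvMin a0.toList rest i ≤ (List.count i j.toList : Int) := by
        have hmem : (List.count i j.toList : Int) ∈
            ((List.count i a0.toList : Int) ::
              rest.map (fun j => (List.count i j.toList : Int))) := by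
          simp only [List.mem_cons, List.mem_map]
          exact Or.inr ⟨j, hj, rfl⟩
        have := PySem.List.min?_isMin (xs := (List.count i a0.toList : Int) ::
            rest.map (fun j => (List.count i j.toList : Int))) (key := fun y => y)
          (PySem.List.min?_id_cons _ _) _ hmem
        unfold pvMin
        rw [← List.foldl_map]
        exact this
      have := pvMin_nonneg a0.toList rest i
      rw [List.count_eq_zero.mpr hnm] at hle
      omega
    rw [hzero]
    simp [PySem.List.pyRepeat_singleton]
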